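-- pv_equiv track=rewrite | github.com/dmoruz97/ARBACVerificationLab | arbac.py | apply_CR_rule_to_UA
-- ===== SOURCE A (Python) =====
-- def get_users_from_ua_given_role(ua, role):
--     users = set()
--
--     for u_r in ua:
--         split_u_r = u_r[1:len(u_r)-1].split(',')
--         if (split_u_r[1] == role):
--             users.add(split_u_r[0])
--
--     return users
--
-- def apply_CR_rule_to_UA(cr_rule, ua):
--     split_c_r = cr_rule[1:len(cr_rule)-1].split(',')
--
--     users = get_users_from_ua_given_role(ua, split_c_r[0])
--     if (len(users) >= 1):    # if exist some users with the administrative role in ua...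
--         temp_ua = ua.copy()
--         for u_a in ua:
--             split_u_a = u_a[1:len(u_a)-1].split(',')
--             if (split_u_a[1] == split_c_r[1]):  # if exists a role that can be removed...
--                 temp_ua.remove(u_a)
--                 #break # to remove the first found
--
--         ua.clear()
--         ua = temp_ua.copy()
--
--     return ua
-- ===== SOURCE B (Python) =====
-- def apply_CR_rule_to_UA(cr_rule, ua):
--     # One parsing pass: cache each entry's role and detect an admin-role holder;
--     # the target role is read from cr_rule only when an admin match exists (as in A).
--     inner = cr_rule[1:len(cr_rule)-1].split(',')
--     has_admin = False
--     roles = []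
--     for entry in ua:
--         r = entry[1:len(entry)-1].split(',')[1]
--         roles.append(r)
--         if r == inner[0]:
--             has_admin = True
--     if has_admin:
--         target = inner[1]
--         filtered = {e for e, r in zip(ua, roles) if r != target}
--         ua.clear()
--         return filtered
--     return ua
-- ===== Notes on version B (the rewrite author's own statement) =====
-- stated objective: alternative
-- what changed: A builds a set of admin users in a helper pass and then re-parses every entry in a second pass calling temp_ua.remove per match; B parses each entry exactly once in a single pass, caching its role and an admin flag, and then produces the result by a zip-filter over the cached roles, reading cr_rule's target field only when an admin match exists (exactly where A does).
import Mathlib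
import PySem

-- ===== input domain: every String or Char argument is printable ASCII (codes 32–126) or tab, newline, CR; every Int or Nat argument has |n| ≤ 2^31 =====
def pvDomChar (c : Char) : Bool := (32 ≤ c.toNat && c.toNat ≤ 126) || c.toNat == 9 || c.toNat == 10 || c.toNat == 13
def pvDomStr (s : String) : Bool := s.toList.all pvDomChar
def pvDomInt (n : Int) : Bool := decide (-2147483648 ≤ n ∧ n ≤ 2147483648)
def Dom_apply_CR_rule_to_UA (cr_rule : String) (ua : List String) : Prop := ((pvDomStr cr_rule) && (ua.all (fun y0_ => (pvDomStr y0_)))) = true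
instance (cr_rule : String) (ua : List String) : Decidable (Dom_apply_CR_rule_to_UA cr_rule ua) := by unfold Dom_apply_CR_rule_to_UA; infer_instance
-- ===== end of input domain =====

-- B collapses A's two re-parsing passes (set-building helper + removal loop with list.remove)
-- into one parsing pass caching each entry's role plus an admin flag, then a zip-filter
-- (objective: alternative); return-value equivalence is proved, the caller-visible mutation
-- of ua (cleared exactly when an admin match exists) is the same in both.


-- ===== PORT A =====
-- s[1:len(s)-1].split(',')  — split? is `some` because "," ≠ ""; the getD [] is never the raising case
def pvSplitA (s : String) : List String :=
  (PySem.Str.split? (PySem.Str.slice s (some 1) (some (PySem.Str.len s - 1))) ",").getD []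

-- the [1]/[0] indexing raises IndexError in Python when out of range; `.getD ""` is exact under Pre_
def get_users_from_ua_given_role (ua : List String) (role : String) : PySem.Set String :=
  ua.foldl (fun users u_r =>
    let split_u_r := pvSplitA u_r
    if (PySem.List.pyGet? split_u_r 1).getD "" == role then
      PySem.Set.add users ((PySem.List.pyGet? split_u_r 0).getD "")
    else users) PySem.Set.empty

def apply_CR_rule_to_UA (cr_rule : String) (ua : List String) : List String :=
  let split_c_r := pvSplitA cr_rule
  let users := get_users_from_ua_given_role ua ((PySem.List.pyGet? split_c_r 0).getD "")
  if 1 ≤ users.length then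
    let temp_ua := ua.foldl (fun temp u_a =>
      let split_u_a := pvSplitA u_a
      if (PySem.List.pyGet? split_u_a 1).getD "" == (PySem.List.pyGet? split_c_r 1).getD "" then
        (PySem.List.remove? temp u_a).getD temp
      else temp) ua
    temp_ua
  else ua

-- ===== PORT B =====
def pvSplitB (s : String) : List String :=
  (PySem.Str.split? (PySem.Str.slice s (some 1) (some (PySem.Str.len s - 1))) ",").getD []

def apply_CR_rule_to_UA_alt (cr_rule : String) (ua : List String) : List String :=
  let inner := pvSplitB cr_rule
  let st := ua.foldl (fun (acc : Bool × List String) entry =>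
      let r := (PySem.List.pyGet? (pvSplitB entry) 1).getD ""
      (acc.1 || (r == (PySem.List.pyGet? inner 0).getD ""), acc.2 ++ [r]))
    (false, ([] : List String))
  if st.1 then
    let target := (PySem.List.pyGet? inner 1).getD ""
    PySem.Set.ofList (((ua.zip st.2).filter (fun p => p.2 != target)).map Prod.fst)
  else ua

-- ===== PRECONDITION & SPEC =====
-- Pre_'s own copy of the field parser (Pre_ may not reference either port)
def pvFieldsPre (s : String) : List String :=
  (PySem.Str.split? (PySem.Str.slice s (some 1) (some (PySem.Str.len s - 1))) ",").getD []

-- Pre_ excludes exactly the inputs on which Python A raises IndexError — an entry of ua whose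
-- bracket-stripped interior splits into fewer than two fields, or a cr_rule with fewer than two
-- fields while some entry's role equals cr_rule's first field (A then reads split_c_r[1]);
-- B raises identically on all of these.  ua is a Python set[str], so by the type convention its
-- Lean list holds distinct elements (Nodup).
def Pre_apply_CR_rule_to_UA (cr_rule : String) (ua : List String) : Prop :=
  ua.Nodup ∧ (∀ e ∈ ua, 2 ≤ (pvFieldsPre e).length) ∧
    (2 ≤ (pvFieldsPre cr_rule).length ∨
      ∀ e ∈ ua, ¬ ((PySem.List.pyGet? (pvFieldsPre e) 1).getD ""
                    = (PySem.List.pyGet? (pvFieldsPre cr_rule) 0).getD ""))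

instance (cr_rule : String) (ua : List String) : Decidable (Pre_apply_CR_rule_to_UA cr_rule ua) := by
  unfold Pre_apply_CR_rule_to_UA; infer_instance

def pvWitness_apply_CR_rule_to_UA : String × List String := ("(a,r)", ["(u,a)", "(v,r)"])

def Spec_apply_CR_rule_to_UA (cr_rule : String) (ua : List String) (out : List String) : Prop := out = apply_CR_rule_to_UA_alt cr_rule ua
instance (cr_rule : String) (ua : List String) (out : List String) : Decidable (Spec_apply_CR_rule_to_UA cr_rule ua out) := by unfold Spec_apply_CR_rule_to_UA; infer_instance

-- ===== CLAIM (what is proved, stated in full; the proofs are below) =====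
def Claim_equal_apply_CR_rule_to_UA : Prop := ∀ (cr_rule : String) (ua : List String), Dom_apply_CR_rule_to_UA cr_rule ua → Pre_apply_CR_rule_to_UA cr_rule ua → Spec_apply_CR_rule_to_UA cr_rule ua (apply_CR_rule_to_UA cr_rule ua)

-- ===== LEMMAS AND PROOFS =====

theorem pvSplitB_eq : pvSplitB = pvSplitA := rfl

-- the two role tests both ports perform, named for the proofs
def pvP (cr e : String) : Bool :=
  (PySem.List.pyGet? (pvSplitA e) 1).getD "" == (PySem.List.pyGet? (pvSplitA cr) 0).getD ""

def pvQ (cr e : String) : Bool :=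
  (PySem.List.pyGet? (pvSplitA e) 1).getD "" == (PySem.List.pyGet? (pvSplitA cr) 1).getD ""

theorem pv_add_ne_nil {s : PySem.Set String} {x : String} : PySem.Set.add s x ≠ [] := by
  intro h
  have hx : x ∈ PySem.Set.add s x := (PySem.Set.mem_add s x x).mpr (Or.inr rfl)
  rw [h] at hx
  exact List.not_mem_nil hx

-- A's helper fold is empty iff no element satisfies the role test
theorem pv_users_eq_nil (p : String → Bool) (u : String → String) :
    ∀ (l : List String) (acc : PySem.Set String),
      (l.foldl (fun s e => if p e then PySem.Set.add s (u e) else s) acc) = []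
        ↔ acc = [] ∧ l.all (fun e => !p e) := by
  intro l
  induction l with
  | nil => simp
  | cons e t ih =>
    intro acc
    simp only [List.foldl_cons, List.all_cons, ih]
    by_cases hp : p e = true
    · simp [hp, pv_add_ne_nil]
    · simp [Bool.eq_false_iff.mpr hp]

theorem pv_remove_append {A rest : List String} {e : String} (h : e ∉ A) :
    PySem.List.remove? (A ++ e :: rest) e = some (A ++ rest) := by
  induction A with
  | nil => simp [PySem.List.remove?_cons_self]
  | cons a A ih =>
    have hne : a ≠ e := fun hae => h (hae ▸ List.mem_cons_self)
    have h' : e ∉ A := fun hm => h (List.mem_cons_of_mem _ hm)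
    simp [PySem.List.remove?_cons_of_ne _ hne, ih h']

-- A's removal fold computes a filter on Nodup input
theorem pv_remove_fold (q : String → Bool) :
    ∀ (todo done : List String), (done ++ todo).Nodup →
      todo.foldl (fun t e => if q e then (PySem.List.remove? t e).getD t else t)
        (done.filter (fun e => !q e) ++ todo)
        = (done ++ todo).filter (fun e => !q e) := by
  intro todo
  induction todo with
  | nil => intro done _; simp
  | cons e rest ih =>
    intro done hnd
    have heD : e ∉ done.filter (fun e => !q e) := by
      intro hm
      have hed : e ∈ done := List.mem_of_mem_filter hm
      exact (List.nodup_append.mp hnd).2.2 e hed e List.mem_cons_self rfl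
    have hstep : (if q e then
        (PySem.List.remove? (done.filter (fun e => !q e) ++ e :: rest) e).getD
          (done.filter (fun e => !q e) ++ e :: rest)
        else (done.filter (fun e => !q e) ++ e :: rest))
        = (done ++ [e]).filter (fun e => !q e) ++ rest := by
      by_cases hq : q e = true
      · simp [hq, pv_remove_append heD, List.filter_append]
      · simp [Bool.eq_false_iff.mpr hq, List.filter_append]
    have hnd2 : ((done ++ [e]) ++ rest).Nodup := by
      simpa [List.append_assoc] using hnd
    calc (e :: rest).foldl (fun t e => if q e then (PySem.List.remove? t e).getD t else t)
          (done.filter (fun e => !q e) ++ e :: rest)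
        = rest.foldl (fun t e => if q e then (PySem.List.remove? t e).getD t else t)
            ((done ++ [e]).filter (fun e => !q e) ++ rest) := by
          simp only [List.foldl_cons, hstep]
      _ = ((done ++ [e]) ++ rest).filter (fun e => !q e) := ih (done ++ [e]) hnd2
      _ = (done ++ e :: rest).filter (fun e => !q e) := by simp [List.append_assoc]

-- B's single fold splits into the admin flag and the cached role list
theorem pv_pair_fold (p : String → Bool) (f : String → String) :
    ∀ (l : List String) (b : Bool) (rs : List String),
      l.foldl (fun (acc : Bool × List String) e => (acc.1 || p e, acc.2 ++ [f e])) (b, rs)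
        = (b || l.any p, rs ++ l.map f) := by
  intro l
  induction l with
  | nil => simp
  | cons e t ih =>
    intro b rs
    simp [List.foldl_cons, ih, Bool.or_assoc]

-- zip-with-cached-roles filter collapses to a plain filter of ua
theorem pv_zip_filter (f : String → String) (g : String → Bool) :
    ∀ (l : List String),
      (((l.zip (l.map f)).filter (fun p => g p.2)).map Prod.fst)
        = l.filter (fun e => g (f e)) := by
  intro l
  induction l with
  | nil => simp
  | cons e t ih =>
    simp only [List.map_cons, List.zip_cons_cons, List.filter_cons]
    by_cases hg : g (f e) = true
    · simp [hg, ih]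
    · simp [Bool.eq_false_iff.mpr hg, ih]

-- each port, rewritten to the common canonical form
theorem pv_portA_eq (cr : String) (ua : List String) (hnd : ua.Nodup) :
    apply_CR_rule_to_UA cr ua
      = if ua.any (pvP cr) then ua.filter (fun e => !pvQ cr e) else ua := by
  unfold apply_CR_rule_to_UA get_users_from_ua_given_role
  change (if 1 ≤ (List.foldl (fun users u_r => if pvP cr u_r then
        PySem.Set.add users ((PySem.List.pyGet? (pvSplitA u_r) 0).getD "") else users)
        PySem.Set.empty ua).length then
      List.foldl (fun temp u_a => if pvQ cr u_a then
        (PySem.List.remove? temp u_a).getD temp else temp) ua ua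
    else ua) = _
  have hA := pv_users_eq_nil (pvP cr)
    (fun e => (PySem.List.pyGet? (pvSplitA e) 0).getD "") ua PySem.Set.empty
  by_cases hany : ua.any (pvP cr) = true
  · have husers : ¬ (List.foldl (fun users u_r => if pvP cr u_r then
        PySem.Set.add users ((PySem.List.pyGet? (pvSplitA u_r) 0).getD "") else users)
        PySem.Set.empty ua) = [] := by
      rw [hA]
      rintro ⟨-, hall⟩
      rcases List.any_eq_true.mp hany with ⟨x, hx, hpx⟩
      have := List.all_eq_true.mp hall x hx
      simp [hpx] at this
    have hlen : 1 ≤ (List.foldl (fun users u_r => if pvP cr u_r then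
        PySem.Set.add users ((PySem.List.pyGet? (pvSplitA u_r) 0).getD "") else users)
        PySem.Set.empty ua).length :=
      Nat.one_le_iff_ne_zero.mpr (fun h => husers (List.eq_nil_of_length_eq_zero h))
    rw [if_pos hlen, if_pos hany]
    have hrem := pv_remove_fold (pvQ cr) ua ([] : List String) (by simpa using hnd)
    simpa using hrem
  · have husers : (List.foldl (fun users u_r => if pvP cr u_r then
        PySem.Set.add users ((PySem.List.pyGet? (pvSplitA u_r) 0).getD "") else users)
        PySem.Set.empty ua) = [] := by
      rw [hA]
      refine ⟨rfl, List.all_eq_true.mpr ?_⟩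
      intro x hx
      have hnp : ¬ pvP cr x = true := fun hpx => hany (List.any_eq_true.mpr ⟨x, hx, hpx⟩)
      simp [Bool.eq_false_iff.mpr hnp]
    rw [if_neg hany, husers]
    simp

theorem pv_portB_eq (cr : String) (ua : List String) (hnd : ua.Nodup) :
    apply_CR_rule_to_UA_alt cr ua
      = if ua.any (pvP cr) then ua.filter (fun e => !pvQ cr e) else ua := by
  unfold apply_CR_rule_to_UA_alt
  simp only [pvSplitB_eq]
  -- fold the port's literal tests into pvP/pvQ (definitional: != is !(· == ·))
  change (if (List.foldl (fun (acc : Bool × List String) entry =>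
      (acc.1 || pvP cr entry,
        acc.2 ++ [(PySem.List.pyGet? (pvSplitA entry) 1).getD ""])) (false, []) ua).1 then
      PySem.Set.ofList (((ua.zip (List.foldl (fun (acc : Bool × List String) entry =>
        (acc.1 || pvP cr entry,
          acc.2 ++ [(PySem.List.pyGet? (pvSplitA entry) 1).getD ""])) (false, []) ua).2).filter
        (fun p => p.2 != (PySem.List.pyGet? (pvSplitA cr) 1).getD "")).map Prod.fst)
    else ua) = _
  rw [pv_pair_fold (pvP cr) (fun e => (PySem.List.pyGet? (pvSplitA e) 1).getD "") ua false []]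
  simp only [Bool.false_or, List.nil_append]
  by_cases hany : ua.any (pvP cr) = true
  · rw [if_pos hany, if_pos hany]
    have hz := pv_zip_filter (fun e => (PySem.List.pyGet? (pvSplitA e) 1).getD "")
      (fun r => r != (PySem.List.pyGet? (pvSplitA cr) 1).getD "") ua
    rw [hz]
    have : (fun e => (PySem.List.pyGet? (pvSplitA e) 1).getD ""
        != (PySem.List.pyGet? (pvSplitA cr) 1).getD "") = (fun e => !pvQ cr e) := rfl
    rw [this, PySem.Set.ofList_eq_self_of_nodup _ (hnd.filter _)]
  · rw [if_neg hany, if_neg hany]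

-- ===== VERDICT (by name: the statement is the Claim_ definition above) =====
theorem apply_CR_rule_to_UA_spec : Claim_equal_apply_CR_rule_to_UA := by
  intro cr_rule ua _hdom hpre
  obtain ⟨hnd, -, -⟩ := hpre
  unfold Spec_apply_CR_rule_to_UA
  rw [pv_portA_eq cr_rule ua hnd, pv_portB_eq cr_rule ua hnd]
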